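-- pv_equiv track=rewrite | github.com/JorgeStolfi/Projeto-MC857-2020-1 | comando_buscar_trecho_IMP.py | verifica_pelo_menos_um_campo
-- ===== SOURCE A (Python) =====
-- def verifica_pelo_menos_um_campo(campos, dict):
--   """
--       Garante que:
--        - Todos os campos da busca são suportados pelo Objeto_Trecho
--        - Todos os campos da busca estão definidos com algo diferente de None
--        - Pelo menos um campo de busca está definido
--   """
--
--   for campo_busca in list(dict.keys()):
--     if campo_busca not in campos:
--         del dict[campo_busca]
--
--   tem_campo = False
--   for campo in campos:
--     if campo in dict and dict[campo] is not None:
--       if dict[campo] is None: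
--         del dict[campo]
--       else:
--         tem_campo = True
--         break
--
--   return tem_campo
-- ===== SOURCE B (Python) =====
-- def verifica_pelo_menos_um_campo(campos, dict):
--   # single fused pass over a snapshot of the keys: prune unsupported keys
--   # and look for a non-None supported field in the same traversal
--   tem_campo = False
--   for k in list(dict.keys()):
--     if k not in campos:
--       del dict[k]
--     elif dict[k] is not None:
--       tem_campo = True
--   return tem_campo
-- ===== Notes on version B (the rewrite author's own statement) =====
-- stated objective: simpler
-- what changed: A's two sequential passes (prune unsupported keys, then scan campos for a defined field, with a dead 'del' branch and a break) are fused into one loop over a snapshot of the dict's keys that prunes and sets the flag in the same traversal; the dead branch disappears.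
import Mathlib
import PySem

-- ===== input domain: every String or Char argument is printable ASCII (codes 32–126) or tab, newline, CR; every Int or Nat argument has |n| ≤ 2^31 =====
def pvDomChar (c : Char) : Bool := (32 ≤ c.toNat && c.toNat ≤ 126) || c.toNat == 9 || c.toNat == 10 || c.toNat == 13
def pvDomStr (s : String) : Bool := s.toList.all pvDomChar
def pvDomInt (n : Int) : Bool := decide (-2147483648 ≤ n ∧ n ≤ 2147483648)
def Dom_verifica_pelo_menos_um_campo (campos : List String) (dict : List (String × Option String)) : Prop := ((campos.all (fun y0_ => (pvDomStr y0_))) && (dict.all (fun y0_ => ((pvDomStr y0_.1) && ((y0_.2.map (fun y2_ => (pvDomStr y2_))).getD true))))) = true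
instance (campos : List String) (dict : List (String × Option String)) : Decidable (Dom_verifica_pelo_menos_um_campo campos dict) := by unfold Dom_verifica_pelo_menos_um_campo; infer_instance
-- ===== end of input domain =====

-- B fuses A's two passes (prune unsupported keys, then scan for a defined field) into one
-- loop over a snapshot of the keys; both mutate the caller's dict identically (return value proved here).


-- ===== PORT A =====
-- first loop: 'for campo_busca in list(dict.keys()): if campo_busca not in campos: del dict[campo_busca]'
def pvAPrune (campos : List String) (d : PySem.Dict String (Option String)) : PySem.Dict String (Option String) :=
  (PySem.Dict.keys d).foldl (fun d k => if !(campos.contains k) then d.erase k else d) d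

-- second loop: 'for campo in campos: if campo in dict and dict[campo] is not None: …'
def pvAScan (d : PySem.Dict String (Option String)) : List String → Bool
  | [] => false
  | c :: cs =>
    if d.contains c && ((d.get? c).getD none) != none then
      if ((d.get? c).getD none) == none then pvAScan (d.erase c) cs
      else true
    else pvAScan d cs

def verifica_pelo_menos_um_campo (campos : List String) (dict : List (String × Option String)) : Bool :=
  pvAScan (pvAPrune campos (PySem.Dict.mk dict)) campos

-- ===== PORT B =====
-- one fused loop over a snapshot of the keys, state = (current dict, tem_campo flag)
def verifica_pelo_menos_um_campo_alt (campos : List String) (dict : List (String × Option String)) : Bool :=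
  ((PySem.Dict.keys (PySem.Dict.mk dict)).foldl
    (fun (st : PySem.Dict String (Option String) × Bool) k =>
      if !(campos.contains k) then (st.1.erase k, st.2)
      else if ((st.1.get? k).getD none) != none then (st.1, true)
      else st)
    (PySem.Dict.mk dict, false)).2

-- ===== PRECONDITION & SPEC =====
def Spec_verifica_pelo_menos_um_campo (campos : List String) (dict : List (String × Option String)) (out : Bool) : Prop := out = verifica_pelo_menos_um_campo_alt campos dict
instance (campos : List String) (dict : List (String × Option String)) (out : Bool) : Decidable (Spec_verifica_pelo_menos_um_campo campos dict out) := by unfold Spec_verifica_pelo_menos_um_campo; infer_instance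

-- ===== CLAIM (what is proved, stated in full; the proofs are below) =====
def Claim_equal_verifica_pelo_menos_um_campo : Prop := ∀ (campos : List String) (dict : List (String × Option String)), Dom_verifica_pelo_menos_um_campo campos dict → Spec_verifica_pelo_menos_um_campo campos dict (verifica_pelo_menos_um_campo campos dict)

-- ===== LEMMAS AND PROOFS =====

-- erasing a different key does not change a lookup
theorem pv_get?_erase_of_ne {ν : Type} (d : PySem.Dict String ν) {k c : String} (h : c ≠ k) :
    (d.erase k).get? c = d.get? c := by
  cases d with
  | mk items =>
    induction items with
    | nil => rfl
    | cons p rest ih =>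
      simp only [PySem.Dict.erase, List.filter] at *
      by_cases hpk : p.1 = k
      · have : (p.1 == k) = true := by simp [hpk]
        simp only [this, Bool.not_true]
        have hc : (p.1 == c) = false := by simp [hpk]; exact fun e => h e.symm
        rw [show (PySem.Dict.mk (p :: rest)).get? c
              = if p.1 == c then some p.2 else (PySem.Dict.mk rest).get? c
            from PySem.Dict.get?_mk_cons ..]
        simp only [hc]
        exact ih
      · have : (p.1 == k) = false := by simp [hpk]
        simp only [this, Bool.not_false]
        rw [PySem.Dict.get?_mk_cons, PySem.Dict.get?_mk_cons]
        by_cases hpc : p.1 = c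
        · simp [hpc]
        · have hc : (p.1 == c) = false := by simp [hpc]
          simp only [hc]
          exact ih

-- pruning keys not supported by campos leaves every supported lookup unchanged
theorem pv_prune_get? (campos : List String) (ks : List String)
    (d : PySem.Dict String (Option String)) {c : String} (hc : campos.contains c = true) :
    (ks.foldl (fun d k => if !(campos.contains k) then d.erase k else d) d).get? c = d.get? c := by
  induction ks generalizing d with
  | nil => rfl
  | cons k ks ih =>
    simp only [List.foldl_cons]
    by_cases hk : campos.contains k = true
    · simp only [hk, Bool.not_true]; exact ih d
    · have hne : c ≠ k := fun e => hk (e ▸ hc)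
      simp only [eq_false_of_ne_true hk, Bool.not_false, if_true]
      rw [ih (d.erase k), pv_get?_erase_of_ne d hne]

-- A's second loop is an 'any' over campos (its inner 'del' branch is dead)
theorem pv_scan_eq_any (d : PySem.Dict String (Option String)) (cs : List String) :
    pvAScan d cs = cs.any (fun c => d.contains c && ((d.get? c).getD none) != none) := by
  induction cs with
  | nil => rfl
  | cons c cs ih =>
    rw [pvAScan, List.any_cons]
    by_cases h : (d.contains c && ((d.get? c).getD none) != none) = true
    · have h2 : (((d.get? c).getD none) == none) = false := by
        rcases Bool.and_eq_true .. |>.mp h with ⟨_, hne⟩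
        exact beq_eq_false_iff_ne.mpr (bne_iff_ne.mp hne)
      simp [h, h2]
    · simp [h, ih]

-- a non-None lookup implies membership
theorem pv_lookup_contains (d : PySem.Dict String (Option String)) (c : String)
    (h : ¬ ((d.get? c).getD none) = none) : d.contains c = true := by
  cases hg : d.get? c with
  | none => exact absurd (by simp [hg]) h
  | some v =>
    rw [PySem.Dict.contains_eq_isSome_get?, hg]; rfl

-- B's fused loop: the flag it returns is an 'any' over the traversed keys,
-- provided supported lookups in the running dict agree with the original one
theorem pv_fused_eq_any (campos : List String) (d0 : PySem.Dict String (Option String))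
    (ks : List String) (d : PySem.Dict String (Option String)) (flag : Bool)
    (hinv : ∀ c, campos.contains c = true → d.get? c = d0.get? c) :
    (ks.foldl
      (fun (st : PySem.Dict String (Option String) × Bool) k =>
        if !(campos.contains k) then (st.1.erase k, st.2)
        else if ((st.1.get? k).getD none) != none then (st.1, true)
        else st)
      (d, flag)).2
    = (flag || ks.any (fun k => campos.contains k && ((d0.get? k).getD none) != none)) := by
  induction ks generalizing d flag with
  | nil => simp
  | cons k ks ih =>
    simp only [List.foldl_cons, List.any_cons]
    by_cases hk : campos.contains k = true
    · have hkm : k ∈ campos := List.contains_iff_mem.mp hk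
      rw [hinv k hk]
      by_cases hv : (((d0.get? k).getD none) != none) = true
      · rw [if_neg (by simp [hkm]), if_pos hv, ih d true hinv]
        simp [hkm, hv]
      · rw [if_neg (by simp [hkm]), if_neg hv, ih d flag hinv]
        simp [hkm, eq_false_of_ne_true hv]
    · have hkm : k ∉ campos := fun hm => hk (List.contains_iff_mem.mpr hm)
      rw [if_pos (by simp [hkm])]
      simp only [eq_false_of_ne_true hk, Bool.false_and, Bool.false_or]
      refine ih (d.erase k) flag (fun c hc => ?_)
      have hne : c ≠ k := fun e => hk (e ▸ hc)
      rw [pv_get?_erase_of_ne d hne, hinv c hc]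

-- the two 'any's agree: a supported key with a non-None value is found either way
theorem pv_any_swap (campos : List String) (d0 : PySem.Dict String (Option String)) :
    campos.any (fun c => d0.contains c && ((d0.get? c).getD none) != none)
    = (PySem.Dict.keys d0).any (fun k => campos.contains k && ((d0.get? k).getD none) != none) := by
  rcases Bool.eq_false_or_eq_true
      (campos.any (fun c => d0.contains c && ((d0.get? c).getD none) != none)) with h | h
  · rw [h]
    rcases List.any_eq_true.mp h with ⟨c, hcmem, hc⟩
    rcases Bool.and_eq_true .. |>.mp hc with ⟨hcont, hcv⟩
    symm
    refine List.any_eq_true.mpr ⟨c, ?_, ?_⟩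
    · exact (PySem.Dict.contains_iff_mem_keys ..).mp hcont
    · simp [hcmem, hcv]
  · rw [h]
    symm
    rw [Bool.eq_false_iff]
    intro habs
    rcases List.any_eq_true.mp habs with ⟨k, hkmem, hk⟩
    rcases Bool.and_eq_true .. |>.mp hk with ⟨hkc, hkv⟩
    have : campos.any (fun c => d0.contains c && ((d0.get? c).getD none) != none) = true := by
      refine List.any_eq_true.mpr ⟨k, ?_, ?_⟩
      · exact (List.contains_iff_mem).mp hkc
      · have hcont : d0.contains k = true := pv_lookup_contains d0 k (bne_iff_ne.mp hkv)
        simp [hcont, hkv]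
  
    rw [h] at this; exact Bool.false_ne_true this

-- a non-None lookup already implies membership, so the 'contains' conjunct is redundant
theorem pv_cond_simp (d : PySem.Dict String (Option String)) (c : String) :
    (d.contains c && ((d.get? c).getD none) != none) = (((d.get? c).getD none) != none) := by
  by_cases h : ((d.get? c).getD none) = none
  · simp [h]
  · simp [pv_lookup_contains d c h]

-- ===== VERDICT (by name: the statement is the Claim_ definition above) =====
theorem verifica_pelo_menos_um_campo_spec : Claim_equal_verifica_pelo_menos_um_campo := by
  intro campos dict _
  unfold Spec_verifica_pelo_menos_um_campo
  unfold verifica_pelo_menos_um_campo verifica_pelo_menos_um_campo_alt pvAPrune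
  set d0 := PySem.Dict.mk dict with hd0
  rw [pv_scan_eq_any, pv_fused_eq_any campos d0 _ d0 false (fun _ _ => rfl), Bool.false_or,
    ← pv_any_swap]
  apply Bool.eq_iff_iff.mpr
  constructor <;> intro h <;> rcases List.any_eq_true.mp h with ⟨c, hm, hc⟩ <;>
    refine List.any_eq_true.mpr ⟨c, hm, ?_⟩ <;>
    have hcc : campos.contains c = true := List.contains_iff_mem.mpr hm
  · rw [pv_cond_simp] at hc
    rw [pv_prune_get? campos _ d0 hcc] at hc
    rw [pv_cond_simp]
    exact hc
  · rw [pv_cond_simp] at hc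
    rw [pv_cond_simp, pv_prune_get? campos _ d0 hcc]
    exact hc
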